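-- pv_equiv track=rewrite | github.com/DiogoAlves002/level-up-advanced-python-3213390 | challenge/pairwise_offset.py | pairwise_offset
-- ===== SOURCE A (Python) =====
-- def pairwise_offset(sequence, fillvalue= "*", offset= 0):
--   it = []
--
--   seq = [fillvalue] * offset + list(sequence)
--   for i in range(len(seq)):
--     if i < len(sequence):
--       pair = (sequence[i], seq[i])
--     else:
--       pair = (fillvalue, seq[i])
--
--     it.append(pair)
--
--   return it
-- ===== SOURCE B (Python) =====
-- def pairwise_offset(sequence, fillvalue="*", offset=0):
--     # Segmented closed form: the result is head ++ mid ++ tail, built piecewise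
--     # instead of looping with a per-index branch over one padded list.
--     seq = list(sequence)
--     n = len(seq)
--     k = max(offset, 0)
--     head = [(x, fillvalue) for x in seq[:k]]
--     mid = [(a, b) for a, b in zip(seq[k:], seq)]
--     tail = [(fillvalue, fillvalue)] * max(k - n, 0) \
--         + [(fillvalue, x) for x in seq[max(n - k, 0):]]
--     return head + mid + tail
-- ===== Notes on version B (the rewrite author's own statement) =====
-- stated objective: alternative
-- what changed: Replaces A's single indexed loop with a per-index 'i < len(sequence)' branch over one padded list by a branch-free segmented closed form: three slice-based segments (head of (x, fillvalue) pairs, middle zip of the shifted sequence with itself, fill tail) concatenated.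
import Mathlib
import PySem

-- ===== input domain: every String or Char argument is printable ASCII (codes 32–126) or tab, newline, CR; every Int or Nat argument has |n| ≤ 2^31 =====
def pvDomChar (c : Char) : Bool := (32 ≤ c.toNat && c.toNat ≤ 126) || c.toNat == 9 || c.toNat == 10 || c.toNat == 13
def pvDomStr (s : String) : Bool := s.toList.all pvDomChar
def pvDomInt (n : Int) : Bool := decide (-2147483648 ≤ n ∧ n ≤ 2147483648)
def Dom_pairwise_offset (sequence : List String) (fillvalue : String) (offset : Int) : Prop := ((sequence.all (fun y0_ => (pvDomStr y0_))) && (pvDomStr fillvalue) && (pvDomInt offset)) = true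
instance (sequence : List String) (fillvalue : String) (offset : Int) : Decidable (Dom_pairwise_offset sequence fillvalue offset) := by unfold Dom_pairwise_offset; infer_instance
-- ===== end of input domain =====

-- B replaces A's single loop with its per-index 'i < len(sequence)' branch by a
-- segmented closed form (head / mid / tail concatenation); objective: alternative, same cost.
-- ===== PORT A =====
-- Port of A: build seq = [fillvalue]*offset + sequence, loop i over range(len(seq)),
-- appending (sequence[i], seq[i]) when i < len(sequence), else (fillvalue, seq[i]).
def pairwise_offset (sequence : List String) (fillvalue : String) (offset : Int) : List (String × String) :=
  let seq := List.replicate offset.toNat fillvalue ++ sequence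
  (List.range seq.length).foldl (fun it i =>
    let pair := if i < sequence.length then (sequence.getD i "", seq.getD i "")
                else (fillvalue, seq.getD i "")
    it ++ [pair]) []

-- ===== PORT B =====
-- Port of B: segmented construction head ++ mid ++ tail.
-- Python's max(offset, 0) on ints is (max offset 0).toNat; the Nat subtractions
-- k - n and n - k are exactly Python's max(k - n, 0) and max(n - k, 0).
def pairwise_offset_alt (sequence : List String) (fillvalue : String) (offset : Int) : List (String × String) :=
  let seq := sequence
  let n := seq.length
  let k := (max offset 0).toNat
  let head := (seq.take k).map (fun x => (x, fillvalue))
  let mid := List.zip (seq.drop k) seq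
  let tail := List.replicate (k - n) (fillvalue, fillvalue)
      ++ (seq.drop (n - k)).map (fun x => (fillvalue, x))
  head ++ mid ++ tail

-- ===== PRECONDITION & SPEC =====
def Spec_pairwise_offset (sequence : List String) (fillvalue : String) (offset : Int) (out : List (String × String)) : Prop := out = pairwise_offset_alt sequence fillvalue offset
instance (sequence : List String) (fillvalue : String) (offset : Int) (out : List (String × String)) : Decidable (Spec_pairwise_offset sequence fillvalue offset out) := by unfold Spec_pairwise_offset; infer_instance

-- ===== CLAIM (what is proved, stated in full; the proofs are below) =====
def Claim_equal_pairwise_offset : Prop := ∀ (sequence : List String) (fillvalue : String) (offset : Int), Dom_pairwise_offset sequence fillvalue offset → Spec_pairwise_offset sequence fillvalue offset (pairwise_offset sequence fillvalue offset)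

-- ===== LEMMAS AND PROOFS =====

-- ===== VERDICT (by name: the statement is the Claim_ definition above) =====
-- A's loop appends one pair per index, so it is a map over the range; elementwise
-- it agrees with the three segments of B at every position.
theorem pairwise_offset_spec : Claim_equal_pairwise_offset := by
  intro sequence fillvalue offset _
  unfold Spec_pairwise_offset pairwise_offset pairwise_offset_alt
  have hk : (max offset 0).toNat = offset.toNat := by omega
  rw [PySem.List.foldl_append_singleton_eq_map]
  dsimp only
  rw [hk]
  have hS : ∀ i, i < offset.toNat + sequence.length →
      (List.replicate offset.toNat fillvalue ++ sequence).getD i ""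
      = if i < offset.toNat then fillvalue else sequence.getD (i - offset.toNat) "" := by
    intro i hi
    by_cases h : i < offset.toNat
    · rw [List.getD_eq_getElem _ _ (by simp; omega),
        List.getElem_append_left (by simpa using h), List.getElem_replicate, if_pos h]
    · rw [List.getD_eq_getElem _ _ (by simp; omega),
        List.getElem_append_right (by simp only [List.length_replicate]; omega), if_neg h,
        List.getD_eq_getElem _ _ (by omega)]
      congr 1
      simp
  apply List.ext_getElem
  · simp; omega
  · intro i h1 h2
    have hi : i < offset.toNat + sequence.length := by simpa using h1
    simp only [List.nil_append, List.getElem_map, List.getElem_range]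
    rw [hS i hi]
    simp only [List.getElem_append, List.length_map, List.length_take, List.length_zip,
      List.length_drop, List.length_replicate, List.length_append, List.getElem_map,
      List.getElem_zip, List.getElem_take, List.getElem_drop, List.getElem_replicate]
    split_ifs <;>
      first
        | rfl
        | omega
        | (simp only [Prod.mk.injEq]; constructor <;>
            (try rw [List.getD_eq_getElem]) <;>
            first
              | rfl
              | omega
              | trivial
              | (congr 1; first | rfl | omega))
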